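-- pv_equiv track=rewrite | github.com/lewis0926/GenericAlgorithmTSP | ga_clustering.py | map_clustering
-- ===== SOURCE A (Python) =====
-- def map_clustering(city_list, clustering_list):
--     cluster1 = []
--     cluster2 = []
--     cluster3 = []
--
--     i = 0
--     for cluster_result in clustering_list:
--         if int(cluster_result) == 0:
--             cluster1.append(city_list[i])
--         elif int(cluster_result) == 1:
--             cluster2.append(city_list[i])
--         elif int(cluster_result) == 2:
--             cluster3.append(city_list[i])
--         i += 1
--
--     return cluster1, cluster2, cluster3
-- ===== SOURCE B (Python) =====
-- def map_clustering(city_list, clustering_list):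
--     # Three independent filtering passes over the labels, one per cluster.
--     cluster1 = [city_list[i] for i, r in enumerate(clustering_list) if int(r) == 0]
--     cluster2 = [city_list[i] for i, r in enumerate(clustering_list) if int(r) == 1]
--     cluster3 = [city_list[i] for i, r in enumerate(clustering_list) if int(r) == 2]
--     return cluster1, cluster2, cluster3
-- ===== Notes on version B (the rewrite author's own statement) =====
-- stated objective: alternative
-- what changed: Replaces the single indexed loop that dispatches each label into one of three accumulators with three independent enumerate-filter comprehensions, one scan of the label list per cluster.
import Mathlib
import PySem

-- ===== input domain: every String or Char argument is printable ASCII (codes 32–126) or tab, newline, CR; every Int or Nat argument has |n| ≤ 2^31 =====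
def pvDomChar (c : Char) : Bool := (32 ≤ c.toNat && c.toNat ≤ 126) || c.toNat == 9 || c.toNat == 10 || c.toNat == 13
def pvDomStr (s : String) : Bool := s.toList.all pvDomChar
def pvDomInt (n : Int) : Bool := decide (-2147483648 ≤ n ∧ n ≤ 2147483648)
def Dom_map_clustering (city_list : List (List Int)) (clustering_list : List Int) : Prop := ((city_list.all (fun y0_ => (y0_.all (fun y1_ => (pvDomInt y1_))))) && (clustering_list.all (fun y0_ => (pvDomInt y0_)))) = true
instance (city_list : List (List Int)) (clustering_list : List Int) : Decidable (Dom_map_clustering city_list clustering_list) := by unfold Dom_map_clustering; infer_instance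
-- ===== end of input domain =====

-- B replaces A's single indexed dispatch loop by three independent enumerate-filter
-- passes over the label list, one per cluster (objective: alternative decomposition).

-- ===== PORT A =====
-- A's for-loop with running index i and three accumulators, as a tail recursion over
-- the same state.  city_list[i] is pyGet? (in-range on Pre_; getD [] is never hit there).
def mapClusteringLoopA (city_list : List (List Int)) :
    List Int → Int → List (List Int) → List (List Int) → List (List Int) →
    List (List Int) × List (List Int) × List (List Int)
  | [], _, c1, c2, c3 => (c1, c2, c3)
  | r :: rest, i, c1, c2, c3 =>
    if r = 0 then
      mapClusteringLoopA city_list rest (i + 1)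
        (c1 ++ [(PySem.List.pyGet? city_list i).getD []]) c2 c3
    else if r = 1 then
      mapClusteringLoopA city_list rest (i + 1)
        c1 (c2 ++ [(PySem.List.pyGet? city_list i).getD []]) c3
    else if r = 2 then
      mapClusteringLoopA city_list rest (i + 1)
        c1 c2 (c3 ++ [(PySem.List.pyGet? city_list i).getD []])
    else
      mapClusteringLoopA city_list rest (i + 1) c1 c2 c3

def map_clustering (city_list : List (List Int)) (clustering_list : List Int) : List (List Int) × List (List Int) × List (List Int) :=
  mapClusteringLoopA city_list clustering_list 0 [] [] []

-- ===== PORT B =====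
-- one comprehension: [city_list[i] for i, r in enumerate(clustering_list) if int(r) == k]
def mapClusteringPick (city_list : List (List Int)) (clustering_list : List Int) (k : Int) : List (List Int) :=
  ((PySem.List.enumerate clustering_list).filter (fun p => p.2 = k)).map
    (fun p => (PySem.List.pyGet? city_list p.1).getD [])

def map_clustering_alt (city_list : List (List Int)) (clustering_list : List Int) : List (List Int) × List (List Int) × List (List Int) :=
  (mapClusteringPick city_list clustering_list 0,
   mapClusteringPick city_list clustering_list 1,
   mapClusteringPick city_list clustering_list 2)

-- ===== PRECONDITION & SPEC =====
-- Pre_ excludes exactly the inputs where A (and B alike) raises IndexError: a position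
-- whose label is 0, 1 or 2 but lies beyond the end of city_list.
def Pre_map_clustering (city_list : List (List Int)) (clustering_list : List Int) : Prop :=
  ∀ i < clustering_list.length,
    (clustering_list.getD i 3 = 0 ∨ clustering_list.getD i 3 = 1 ∨ clustering_list.getD i 3 = 2) →
      i < city_list.length
instance (city_list : List (List Int)) (clustering_list : List Int) : Decidable (Pre_map_clustering city_list clustering_list) := by unfold Pre_map_clustering; infer_instance

def pvWitness_map_clustering : List (List Int) × List Int := ([[1, 2], [3, 4], [5, 6]], [0, 2, 1])

def Spec_map_clustering (city_list : List (List Int)) (clustering_list : List Int) (out : List (List Int) × List (List Int) × List (List Int)) : Prop := out = map_clustering_alt city_list clustering_list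
instance (city_list : List (List Int)) (clustering_list : List Int) (out : List (List Int) × List (List Int) × List (List Int)) : Decidable (Spec_map_clustering city_list clustering_list out) := by unfold Spec_map_clustering; infer_instance

-- ===== CLAIM (what is proved, stated in full; the proofs are below) =====
def Claim_equal_map_clustering : Prop := ∀ (city_list : List (List Int)) (clustering_list : List Int), Dom_map_clustering city_list clustering_list → Pre_map_clustering city_list clustering_list → Spec_map_clustering city_list clustering_list (map_clustering city_list clustering_list)

-- ===== LEMMAS AND PROOFS =====

-- A's loop, from counter i with accumulators c1 c2 c3, appends exactly what each of
-- B's filtering passes (started at i) would collect.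
theorem mapClusteringLoopA_eq (city_list : List (List Int)) :
    ∀ (cs : List Int) (i : Int) (c1 c2 c3 : List (List Int)),
      mapClusteringLoopA city_list cs i c1 c2 c3 =
        (c1 ++ ((PySem.List.enumerate cs i).filter (fun p => p.2 = 0)).map
            (fun p => (PySem.List.pyGet? city_list p.1).getD []),
         c2 ++ ((PySem.List.enumerate cs i).filter (fun p => p.2 = 1)).map
            (fun p => (PySem.List.pyGet? city_list p.1).getD []),
         c3 ++ ((PySem.List.enumerate cs i).filter (fun p => p.2 = 2)).map
            (fun p => (PySem.List.pyGet? city_list p.1).getD [])) := by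
  intro cs
  induction cs with
  | nil => intro i c1 c2 c3; simp [mapClusteringLoopA, PySem.List.enumerate_nil]
  | cons r rest ih =>
    intro i c1 c2 c3
    simp only [mapClusteringLoopA, PySem.List.enumerate_cons, List.filter_cons]
    by_cases h0 : r = 0
    · simp [h0, ih]
    · by_cases h1 : r = 1
      · simp [h1, ih]
      · by_cases h2 : r = 2
        · simp [h2, ih]
        · simp [h0, h1, h2, ih]

-- ===== VERDICT (by name: the statement is the Claim_ definition above) =====
theorem map_clustering_spec : Claim_equal_map_clustering := by
  intro city_list clustering_list _ _
  unfold Spec_map_clustering map_clustering map_clustering_alt mapClusteringPick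
  rw [mapClusteringLoopA_eq]
  simp
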